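-- pv_equiv track=rewrite | github.com/arselzer/Spark-Y | backend/app/spark/stage_metrics_collector_rest.py | aggregate_metrics_by_stage
-- ===== SOURCE A (Python) =====
-- from typing import List, Dict, Any, Optional
--
-- def aggregate_metrics_by_stage(stage_metrics: List[Dict]) -> Dict[str, Any]:
--     """
--     Aggregate individual stage metrics into overall query metrics
--
--     Args:
--         stage_metrics: List of stage metric dictionaries
--
--     Returns:
--         Aggregated metrics dictionary
--     """
--     if not stage_metrics:
--         return {}
--
--     aggregated = {
--         'total_stages': len(stage_metrics),
--         'total_shuffle_read_bytes': sum(s.get('shuffle_read_bytes', 0) for s in stage_metrics),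
--         'total_shuffle_write_bytes': sum(s.get('shuffle_write_bytes', 0) for s in stage_metrics),
--         'total_input_records': sum(s.get('input_records', 0) for s in stage_metrics),
--         'total_output_records': sum(s.get('output_records', 0) for s in stage_metrics),
--         'total_input_bytes': sum(s.get('input_bytes', 0) for s in stage_metrics),
--         'total_output_bytes': sum(s.get('output_bytes', 0) for s in stage_metrics),
--         'total_memory_spilled': sum(s.get('memory_bytes_spilled', 0) for s in stage_metrics),
--         'total_disk_spilled': sum(s.get('disk_bytes_spilled', 0) for s in stage_metrics),
--         'total_executor_run_time': sum(s.get('executor_run_time', 0) for s in stage_metrics),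
--         'total_executor_cpu_time': sum(s.get('executor_cpu_time', 0) for s in stage_metrics),
--         'total_jvm_gc_time': sum(s.get('jvm_gc_time', 0) for s in stage_metrics)
--     }
--
--     return aggregated
-- ===== SOURCE B (Python) =====
-- def aggregate_metrics_by_stage(stage_metrics):
--     """Single-pass aggregation: one loop maintains all twelve running totals."""
--     if not stage_metrics:
--         return {}
--     shuffle_read = shuffle_write = in_recs = out_recs = in_bytes = out_bytes = 0
--     mem_spill = disk_spill = run_time = cpu_time = gc_time = 0
--     for s in stage_metrics:
--         shuffle_read += s.get('shuffle_read_bytes', 0)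
--         shuffle_write += s.get('shuffle_write_bytes', 0)
--         in_recs += s.get('input_records', 0)
--         out_recs += s.get('output_records', 0)
--         in_bytes += s.get('input_bytes', 0)
--         out_bytes += s.get('output_bytes', 0)
--         mem_spill += s.get('memory_bytes_spilled', 0)
--         disk_spill += s.get('disk_bytes_spilled', 0)
--         run_time += s.get('executor_run_time', 0)
--         cpu_time += s.get('executor_cpu_time', 0)
--         gc_time += s.get('jvm_gc_time', 0)
--     return {
--         'total_stages': len(stage_metrics),
--         'total_shuffle_read_bytes': shuffle_read,
--         'total_shuffle_write_bytes': shuffle_write,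
--         'total_input_records': in_recs,
--         'total_output_records': out_recs,
--         'total_input_bytes': in_bytes,
--         'total_output_bytes': out_bytes,
--         'total_memory_spilled': mem_spill,
--         'total_disk_spilled': disk_spill,
--         'total_executor_run_time': run_time,
--         'total_executor_cpu_time': cpu_time,
--         'total_jvm_gc_time': gc_time,
--     }
-- ===== Notes on version B (the rewrite author's own statement) =====
-- stated objective: alternative
-- what changed: Replaced A's twelve separate full-list generator passes (one sum(...) per metric) with a single loop over stage_metrics that maintains all eleven running totals simultaneously.
import Mathlib
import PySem

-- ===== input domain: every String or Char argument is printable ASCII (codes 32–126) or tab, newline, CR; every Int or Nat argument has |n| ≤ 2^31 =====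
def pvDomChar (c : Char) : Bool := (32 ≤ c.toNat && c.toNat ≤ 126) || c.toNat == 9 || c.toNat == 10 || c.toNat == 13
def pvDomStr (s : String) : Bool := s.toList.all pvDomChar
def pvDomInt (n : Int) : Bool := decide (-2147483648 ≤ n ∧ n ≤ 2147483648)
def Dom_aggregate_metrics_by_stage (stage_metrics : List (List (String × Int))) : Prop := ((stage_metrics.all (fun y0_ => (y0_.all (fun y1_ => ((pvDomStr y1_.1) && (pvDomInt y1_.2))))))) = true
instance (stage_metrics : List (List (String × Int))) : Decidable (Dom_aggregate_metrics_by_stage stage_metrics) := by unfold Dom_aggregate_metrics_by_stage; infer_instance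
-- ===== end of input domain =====

-- B changes A's twelve separate whole-list summation passes into one loop carrying all totals; alternative decomposition, same results.

-- ===== PORT A =====
-- sum(s.get(k, 0) for s in stage_metrics): one full generator pass per metric key
def pvSumGet (stage_metrics : List (List (String × Int))) (k : String) : Int :=
  stage_metrics.foldl (fun acc s => acc + PySem.Dict.getD ⟨s⟩ k 0) 0

def aggregate_metrics_by_stage (stage_metrics : List (List (String × Int))) : List (String × Int) :=
  if stage_metrics = [] then []
  else
    [("total_stages", (stage_metrics.length : Int)),
     ("total_shuffle_read_bytes", pvSumGet stage_metrics "shuffle_read_bytes"),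
     ("total_shuffle_write_bytes", pvSumGet stage_metrics "shuffle_write_bytes"),
     ("total_input_records", pvSumGet stage_metrics "input_records"),
     ("total_output_records", pvSumGet stage_metrics "output_records"),
     ("total_input_bytes", pvSumGet stage_metrics "input_bytes"),
     ("total_output_bytes", pvSumGet stage_metrics "output_bytes"),
     ("total_memory_spilled", pvSumGet stage_metrics "memory_bytes_spilled"),
     ("total_disk_spilled", pvSumGet stage_metrics "disk_bytes_spilled"),
     ("total_executor_run_time", pvSumGet stage_metrics "executor_run_time"),
     ("total_executor_cpu_time", pvSumGet stage_metrics "executor_cpu_time"),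
     ("total_jvm_gc_time", pvSumGet stage_metrics "jvm_gc_time")]

-- ===== PORT B =====
-- the eleven running totals B's single loop carries
structure PvTotals where
  srb : Int
  swb : Int
  ir : Int
  orc : Int
  ib : Int
  ob : Int
  ms : Int
  ds : Int
  rt : Int
  ct : Int
  gc : Int
  deriving Repr, DecidableEq

def pvStep (t : PvTotals) (s : List (String × Int)) : PvTotals :=
  { srb := t.srb + PySem.Dict.getD ⟨s⟩ "shuffle_read_bytes" 0,
    swb := t.swb + PySem.Dict.getD ⟨s⟩ "shuffle_write_bytes" 0,
    ir  := t.ir  + PySem.Dict.getD ⟨s⟩ "input_records" 0,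
    orc := t.orc + PySem.Dict.getD ⟨s⟩ "output_records" 0,
    ib  := t.ib  + PySem.Dict.getD ⟨s⟩ "input_bytes" 0,
    ob  := t.ob  + PySem.Dict.getD ⟨s⟩ "output_bytes" 0,
    ms  := t.ms  + PySem.Dict.getD ⟨s⟩ "memory_bytes_spilled" 0,
    ds  := t.ds  + PySem.Dict.getD ⟨s⟩ "disk_bytes_spilled" 0,
    rt  := t.rt  + PySem.Dict.getD ⟨s⟩ "executor_run_time" 0,
    ct  := t.ct  + PySem.Dict.getD ⟨s⟩ "executor_cpu_time" 0,
    gc  := t.gc  + PySem.Dict.getD ⟨s⟩ "jvm_gc_time" 0 }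

def aggregate_metrics_by_stage_alt (stage_metrics : List (List (String × Int))) : List (String × Int) :=
  if stage_metrics = [] then []
  else
    let t := stage_metrics.foldl pvStep ⟨0, 0, 0, 0, 0, 0, 0, 0, 0, 0, 0⟩
    [("total_stages", (stage_metrics.length : Int)),
     ("total_shuffle_read_bytes", t.srb),
     ("total_shuffle_write_bytes", t.swb),
     ("total_input_records", t.ir),
     ("total_output_records", t.orc),
     ("total_input_bytes", t.ib),
     ("total_output_bytes", t.ob),
     ("total_memory_spilled", t.ms),
     ("total_disk_spilled", t.ds),
     ("total_executor_run_time", t.rt),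
     ("total_executor_cpu_time", t.ct),
     ("total_jvm_gc_time", t.gc)]

-- ===== PRECONDITION & SPEC =====
def Spec_aggregate_metrics_by_stage (stage_metrics : List (List (String × Int))) (out : List (String × Int)) : Prop := out = aggregate_metrics_by_stage_alt stage_metrics
instance (stage_metrics : List (List (String × Int))) (out : List (String × Int)) : Decidable (Spec_aggregate_metrics_by_stage stage_metrics out) := by unfold Spec_aggregate_metrics_by_stage; infer_instance

-- ===== CLAIM (what is proved, stated in full; the proofs are below) =====
def Claim_equal_aggregate_metrics_by_stage : Prop := ∀ (stage_metrics : List (List (String × Int))), Dom_aggregate_metrics_by_stage stage_metrics → Spec_aggregate_metrics_by_stage stage_metrics (aggregate_metrics_by_stage stage_metrics)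

-- ===== LEMMAS AND PROOFS =====
-- each component of B's combined fold equals the corresponding separate fold of A
theorem pvStep_foldl (l : List (List (String × Int))) (t : PvTotals) :
    l.foldl pvStep t =
      { srb := t.srb + pvSumGet l "shuffle_read_bytes",
        swb := t.swb + pvSumGet l "shuffle_write_bytes",
        ir  := t.ir  + pvSumGet l "input_records",
        orc := t.orc + pvSumGet l "output_records",
        ib  := t.ib  + pvSumGet l "input_bytes",
        ob  := t.ob  + pvSumGet l "output_bytes",
        ms  := t.ms  + pvSumGet l "memory_bytes_spilled",
        ds  := t.ds  + pvSumGet l "disk_bytes_spilled",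
        rt  := t.rt  + pvSumGet l "executor_run_time",
        ct  := t.ct  + pvSumGet l "executor_cpu_time",
        gc  := t.gc  + pvSumGet l "jvm_gc_time" } := by
  induction l generalizing t with
  | nil => simp [pvSumGet]
  | cons s l ih =>
    simp only [List.foldl_cons, ih]
    simp only [pvSumGet, PySem.List.foldl_add, List.map_cons, List.sum_cons, pvStep]
    simp only [PvTotals.mk.injEq]
    refine ⟨by ring, by ring, by ring, by ring, by ring, by ring, by ring, by ring, by ring, by ring, by ring⟩

-- ===== VERDICT (by name: the statement is the Claim_ definition above) =====
theorem aggregate_metrics_by_stage_spec : Claim_equal_aggregate_metrics_by_stage := by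
  intro sm _
  unfold Spec_aggregate_metrics_by_stage aggregate_metrics_by_stage aggregate_metrics_by_stage_alt
  by_cases h : sm = []
  · simp [h]
  · simp only [h, if_false]
    simp [pvStep_foldl]
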